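-- pv_equiv track=rewrite | github.com/yingdongucas/inconsistency_detection | measurement/match_software_names.py | get_matched_software_names
-- ===== SOURCE A (Python) =====
-- def get_matched_software_names(cve_software_list, other_db_software_list):
--     matched_software_dict = {}
--     for cve_software in cve_software_list:
--         matched_software_dict[cve_software] = {}
--         exactly_same_software = ''
--         partly_same_list = []
--         for db_software in other_db_software_list:
--             exactly_same_flg, db_software_or_false = software_name_is_the_same(cve_software, db_software)
--             if exactly_same_flg:
--                 exactly_same_software = db_software
--                 break
--             elif db_software_or_false is not False:
--                 partly_same_list.append(db_software)
--             else:
--                 # todo: check not matched software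
--                 pass
--         if exactly_same_software != '':
--             matched_software_dict[cve_software] = [exactly_same_software]
--             continue
--         elif partly_same_list != []:
--             matched_software_dict[cve_software] = sorted(partly_same_list)
--         else:
--             del matched_software_dict[cve_software]
--     return matched_software_dict
--
-- def software_name_is_the_same(software_1, software_2):
--     # if any word in software_1 exists in software_2 (or vice versa), we consider it is the same
--     # todo: double check this rule
--
--     if software_1 == software_2:
--         # exactly the same
--         return True, software_2
--     software_1_split = software_1.split()
--     software_2_split = software_2.split()
--
--     for w1 in software_1_split:
--         for w2 in software_2_split:
--             if w1 == w2 and w1 != 'linux':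
--                 # not exactly the same
--                 return False, software_2
--     # not same
--     return False, False
-- ===== SOURCE B (Python) =====
-- def get_matched_software_names(cve_software_list, other_db_software_list):
--     # Inverted index: word -> indices of db entries containing it (each db entry once per distinct word).
--     db_set = set(other_db_software_list)
--     index = {}
--     pairs = []
--     for i, db in enumerate(other_db_software_list):
--         for w in dict.fromkeys(db.split()):
--             if w != 'linux':
--                 pairs.append((w, i))
--     for w, i in pairs:
--         index.setdefault(w, []).append(i)
--     result = {}
--     for cve in cve_software_list:
--         if cve in db_set:
--             result[cve] = [cve]
--             continue
--         cands = []
--         for w in cve.split():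
--             cands.extend(index.get(w, ()))
--         idxs = dict.fromkeys(cands)  # ordered dedup of candidate indices
--         if idxs:
--             result[cve] = sorted(other_db_software_list[i] for i in idxs)
--     return result
-- ===== Notes on version B (the rewrite author's own statement) =====
-- stated objective: faster
-- what changed: A compares every cve name against every db name word-by-word (O(C*D*w^2)); B builds an exact-match set and an inverted word->db-index once, then gathers each cve's candidates from its own words and sorts them.
-- intended difference: When '' occurs in both lists, A's '' sentinel for exactly_same_software makes it silently drop the key '' although '' is an exact match in the db list; B returns the intended exact match {'': ['']} for it. — e.g. on get_matched_software_names([""], [""]): A returns [], B returns [("", [""])]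
import Mathlib
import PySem

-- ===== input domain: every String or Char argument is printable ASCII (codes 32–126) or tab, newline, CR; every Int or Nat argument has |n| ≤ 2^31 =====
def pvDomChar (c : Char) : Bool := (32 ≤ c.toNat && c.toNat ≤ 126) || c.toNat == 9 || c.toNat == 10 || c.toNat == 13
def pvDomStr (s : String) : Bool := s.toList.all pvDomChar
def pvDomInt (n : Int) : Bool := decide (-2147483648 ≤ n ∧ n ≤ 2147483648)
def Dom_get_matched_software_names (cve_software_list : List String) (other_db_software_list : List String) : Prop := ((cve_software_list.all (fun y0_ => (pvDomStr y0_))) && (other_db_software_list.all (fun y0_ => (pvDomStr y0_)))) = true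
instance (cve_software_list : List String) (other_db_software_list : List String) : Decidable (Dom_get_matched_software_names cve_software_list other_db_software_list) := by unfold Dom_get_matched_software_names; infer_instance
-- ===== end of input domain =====

-- B replaces A's pairwise scan of all (cve, db) name pairs by an exact-match set plus an inverted
-- word→db-index map built once, gathering each cve's candidates from its own words (asymptotically faster).

-- ===== PORT A =====
-- helper: software_name_is_the_same (Python returns (bool, str|False); False ↦ none)
def pvSoftwareNameIsTheSame (software_1 software_2 : String) : Bool × Option String :=
  if software_1 == software_2 then (true, some software_2)
  else
    let software_1_split := PySem.Str.split₀ software_1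
    let software_2_split := PySem.Str.split₀ software_2
    if software_1_split.any (fun w1 => software_2_split.any (fun w2 => w1 == w2 && !(w1 == "linux"))) then
      (false, some software_2)
    else (false, none)

-- A's inner 'for db_software in other_db_software_list' loop with its break and partly_same accumulator
def pvMatchLoopA (cve_software : String) (partly_same_list : List String) :
    List String → String × List String
  | [] => ("", partly_same_list)
  | db_software :: rest =>
    let r := pvSoftwareNameIsTheSame cve_software db_software
    if r.1 then (db_software, partly_same_list)
    else if r.2.isSome then pvMatchLoopA cve_software (partly_same_list ++ [db_software]) rest
    else pvMatchLoopA cve_software partly_same_list rest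

def get_matched_software_names (cve_software_list : List String) (other_db_software_list : List String) : List (String × List String) :=
  (cve_software_list.foldl (fun d cve_software =>
      -- 'matched_software_dict[cve_software] = {}': placeholder [], always overwritten or deleted below
      let d := d.insert cve_software ([] : List String)
      let ep := pvMatchLoopA cve_software [] other_db_software_list
      if ep.1 ≠ "" then d.insert cve_software [ep.1]
      else if ep.2 ≠ [] then d.insert cve_software (PySem.List.sorted ep.2 (fun x => x) false)
      else d.erase cve_software)
    PySem.Dict.empty).items

-- ===== PORT B =====
def get_matched_software_names_alt (cve_software_list : List String) (other_db_software_list : List String) : List (String × List String) :=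
  let db_set : PySem.Set String := PySem.Set.ofList other_db_software_list
  let pairs : List (String × Int) :=
    (PySem.List.enumerate other_db_software_list).flatMap (fun p =>
      ((PySem.List.dedup (PySem.Str.split₀ p.2)).filter (fun w => !(w == "linux"))).map (fun w => (w, p.1)))
  let index : PySem.Dict String (List Int) :=
    pairs.foldl (fun d p => d.modify p.1 [] (· ++ [p.2])) PySem.Dict.empty
  (cve_software_list.foldl (fun result cve =>
      if db_set.contains cve then result.insert cve [cve]
      else
        let cands := (PySem.Str.split₀ cve).foldl (fun acc w => acc ++ index.getD w []) []
        let idxs := PySem.List.dedup cands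
        if idxs ≠ [] then
          result.insert cve (PySem.List.sorted (idxs.map (fun i => PySem.List.pyGetD other_db_software_list i "")) (fun x => x) false)
        else result)
    PySem.Dict.empty).items

-- ===== PRECONDITION & SPEC =====
-- When '' occurs in both lists, A's '' sentinel for exactly_same_software makes it drop the key ''
-- even though '' is an exact match in the db list; B returns the intended exact match [''] for it.
def D_get_matched_software_names (cve_software_list : List String) (other_db_software_list : List String) : Prop :=
  "" ∈ cve_software_list ∧ "" ∈ other_db_software_list
instance (cve_software_list : List String) (other_db_software_list : List String) : Decidable (D_get_matched_software_names cve_software_list other_db_software_list) := by unfold D_get_matched_software_names; infer_instance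

def Spec_get_matched_software_names (cve_software_list : List String) (other_db_software_list : List String) (out : List (String × List String)) : Prop := ¬ D_get_matched_software_names cve_software_list other_db_software_list → out = get_matched_software_names_alt cve_software_list other_db_software_list
instance (cve_software_list : List String) (other_db_software_list : List String) (out : List (String × List String)) : Decidable (Spec_get_matched_software_names cve_software_list other_db_software_list out) := by unfold Spec_get_matched_software_names; infer_instance

def pvDiffWitness_get_matched_software_names : List String × List String := ([""], [""])
def pvDiffWitnessOut_get_matched_software_names : (List (String × List String)) × (List (String × List String)) := ([], [("", [""])])

-- ===== CLAIM (what is proved, stated in full; the proofs are below) =====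
def Claim_unchanged_get_matched_software_names : Prop := ∀ (cve_software_list : List String) (other_db_software_list : List String), Dom_get_matched_software_names cve_software_list other_db_software_list → Spec_get_matched_software_names cve_software_list other_db_software_list (get_matched_software_names cve_software_list other_db_software_list)
def Claim_changed_get_matched_software_names : Prop := Dom_get_matched_software_names (pvDiffWitness_get_matched_software_names.1) (pvDiffWitness_get_matched_software_names.2) ∧ D_get_matched_software_names (pvDiffWitness_get_matched_software_names.1) (pvDiffWitness_get_matched_software_names.2) ∧ get_matched_software_names (pvDiffWitness_get_matched_software_names.1) (pvDiffWitness_get_matched_software_names.2) = pvDiffWitnessOut_get_matched_software_names.1 ∧ get_matched_software_names_alt (pvDiffWitness_get_matched_software_names.1) (pvDiffWitness_get_matched_software_names.2) = pvDiffWitnessOut_get_matched_software_names.2 ∧ pvDiffWitnessOut_get_matched_software_names.1 ≠ pvDiffWitnessOut_get_matched_software_names.2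
def Claim_exact_get_matched_software_names : Prop := ∀ (cve_software_list : List String) (other_db_software_list : List String), Dom_get_matched_software_names cve_software_list other_db_software_list → D_get_matched_software_names cve_software_list other_db_software_list → get_matched_software_names cve_software_list other_db_software_list ≠ get_matched_software_names_alt cve_software_list other_db_software_list

-- ===== LEMMAS AND PROOFS =====

-- the word-sharing test of software_name_is_the_same, as a predicate
def pvShares (cve db : String) : Bool :=
  (PySem.Str.split₀ cve).any (fun w1 => (PySem.Str.split₀ db).any (fun w2 => w1 == w2 && !(w1 == "linux")))

-- B's pair list and inverted index, named for the proofs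
def pvPairs (dbs : List String) : List (String × Int) :=
  (PySem.List.enumerate dbs).flatMap (fun p =>
    ((PySem.List.dedup (PySem.Str.split₀ p.2)).filter (fun w => !(w == "linux"))).map (fun w => (w, p.1)))

def pvIndex (dbs : List String) : PySem.Dict String (List Int) :=
  (pvPairs dbs).foldl (fun d p => d.modify p.1 [] (· ++ [p.2])) PySem.Dict.empty

-- the per-cve value A's inner loop + branch ends up producing
def pvValA (dbs : List String) (cve : String) : Option (List String) :=
  if (pvMatchLoopA cve [] dbs).1 ≠ "" then some [(pvMatchLoopA cve [] dbs).1]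
  else if (pvMatchLoopA cve [] dbs).2 ≠ [] then
    some (PySem.List.sorted (pvMatchLoopA cve [] dbs).2 (fun x => x) false)
  else none

-- the per-cve value B produces
def pvValB (dbs : List String) (cve : String) : Option (List String) :=
  if (PySem.Set.ofList dbs).contains cve then some [cve]
  else if PySem.List.dedup ((PySem.Str.split₀ cve).foldl (fun acc w => acc ++ (pvIndex dbs).getD w []) []) ≠ [] then
    some (PySem.List.sorted
      ((PySem.List.dedup ((PySem.Str.split₀ cve).foldl (fun acc w => acc ++ (pvIndex dbs).getD w []) [])).map
        (fun i => PySem.List.pyGetD dbs i "")) (fun x => x) false)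
  else none

theorem pvSame_of_ne (cve db : String) (h : cve ≠ db) :
    pvSoftwareNameIsTheSame cve db = (false, if pvShares cve db then some db else none) := by
  simp only [pvSoftwareNameIsTheSame, pvShares, beq_iff_eq, if_neg h]
  split_ifs <;> rfl

theorem pvLoopA_empty_cve (dbs : List String) (p : List String) :
    pvMatchLoopA "" p dbs = ("", p) := by
  induction dbs with
  | nil => rfl
  | cons db rest ih =>
    by_cases h : ("" : String) = db
    · subst h; simp [pvMatchLoopA, pvSoftwareNameIsTheSame]
    · rw [pvMatchLoopA, pvSame_of_ne _ _ h]
      have hsh : pvShares "" db = false := by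
        simp [pvShares, show PySem.Str.split₀ "" = [] from by decide]
      simp [hsh, ih]

theorem pvLoopA_mem (dbs : List String) (cve : String) (p : List String) (h : cve ∈ dbs) :
    (pvMatchLoopA cve p dbs).1 = cve := by
  induction dbs generalizing p with
  | nil => simp at h
  | cons db rest ih =>
    by_cases hdb : cve = db
    · subst hdb; simp [pvMatchLoopA, pvSoftwareNameIsTheSame]
    · have hr : cve ∈ rest := by rcases List.mem_cons.mp h with h1 | h1; exact absurd h1 hdb; exact h1
      rw [pvMatchLoopA, pvSame_of_ne _ _ hdb]
      by_cases hsh : pvShares cve db = true <;> simp [hsh, ih _ hr]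

theorem pvLoopA_not_mem (dbs : List String) (cve : String) (p : List String) (h : cve ∉ dbs) :
    pvMatchLoopA cve p dbs = ("", p ++ dbs.filter (pvShares cve)) := by
  induction dbs generalizing p with
  | nil => simp [pvMatchLoopA]
  | cons db rest ih =>
    have hdb : cve ≠ db := fun hh => h (hh ▸ List.mem_cons_self)
    have hr : cve ∉ rest := fun hh => h (List.mem_cons_of_mem _ hh)
    rw [pvMatchLoopA, pvSame_of_ne _ _ hdb]
    by_cases hsh : pvShares cve db = true
    · simp [hsh, ih _ hr, List.append_assoc]
    · simp [hsh, ih _ hr]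

-- membership in the inverted index
theorem pvMem_index (dbs : List String) (w : String) (i : Int) :
    i ∈ (pvIndex dbs).getD w [] ↔ (w, i) ∈ pvPairs dbs := by
  unfold pvIndex
  rw [PySem.Dict.getD_foldl_modify_append]
  rw [PySem.Dict.getD_empty]
  simp only [List.nil_append, List.mem_map, List.mem_filter, beq_iff_eq]
  constructor
  · rintro ⟨q, ⟨hq, hq1⟩, hq2⟩
    have : q = (w, i) := by cases q; simp_all
    exact this ▸ hq
  · intro hm; exact ⟨(w, i), ⟨hm, rfl⟩, rfl⟩

theorem pvMem_pairs (dbs : List String) (w : String) (i : Int) :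
    (w, i) ∈ pvPairs dbs ↔
      ∃ (k : Nat) (h : k < dbs.length), i = (k : Int) ∧ w ∈ PySem.Str.split₀ dbs[k] ∧ w ≠ "linux" := by
  unfold pvPairs
  simp only [List.mem_flatMap, List.mem_map, List.mem_filter, PySem.List.mem_dedup,
    PySem.List.mem_enumerate_iff, Bool.not_eq_eq_eq_not, Bool.not_true, beq_eq_false_iff_ne,
    ne_eq]
  constructor
  · rintro ⟨q, ⟨k, hk, rfl⟩, w', ⟨hw1, hw2⟩, hwi⟩
    injection hwi with hww hii
    subst hww
    exact ⟨k, hk, by omega, hw1, hw2⟩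
  · rintro ⟨k, hk, rfl, hw1, hw2⟩
    exact ⟨((0 : Int) + k, dbs[k]), ⟨k, hk, rfl⟩, w, ⟨hw1, hw2⟩, by simp⟩

theorem pvShares_iff (cve db : String) :
    pvShares cve db = true ↔
      ∃ w, w ∈ PySem.Str.split₀ cve ∧ w ∈ PySem.Str.split₀ db ∧ w ≠ "linux" := by
  simp only [pvShares, List.any_eq_true, Bool.and_eq_true, beq_iff_eq, Bool.not_eq_eq_eq_not,
    Bool.not_true, beq_eq_false_iff_ne, ne_eq]
  constructor
  · rintro ⟨w1, hw1, w2, hw2, rfl, hne⟩; exact ⟨w1, hw1, hw2, hne⟩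
  · rintro ⟨w, hw1, hw2, hne⟩; exact ⟨w, hw1, w, hw2, rfl, hne⟩

-- the gathered, deduplicated candidate indices are exactly the indices of word-sharing db entries
theorem pvMem_gather (dbs : List String) (cve : String) (i : Int) :
    i ∈ PySem.List.dedup ((PySem.Str.split₀ cve).foldl (fun acc w => acc ++ (pvIndex dbs).getD w []) []) ↔
      ∃ (k : Nat) (h : k < dbs.length), i = (k : Int) ∧ pvShares cve dbs[k] = true := by
  rw [PySem.List.mem_dedup, PySem.List.foldl_append_eq_flatMap, List.nil_append, List.mem_flatMap]
  constructor
  · rintro ⟨w, hw, hi⟩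
    rcases (pvMem_pairs dbs w i).mp ((pvMem_index dbs w i).mp hi) with ⟨k, hk, rfl, h1, h2⟩
    exact ⟨k, hk, rfl, (pvShares_iff _ _).mpr ⟨w, hw, h1, h2⟩⟩
  · rintro ⟨k, hk, rfl, hsh⟩
    rcases (pvShares_iff _ _).mp hsh with ⟨w, hw1, hw2, hw3⟩
    exact ⟨w, hw1, (pvMem_index dbs w k).mpr ((pvMem_pairs dbs w k).mpr ⟨k, hk, rfl, hw2, hw3⟩)⟩

-- gathered candidates, mapped back to names, are a permutation of A's filtered list
theorem pvGather_perm (dbs : List String) (cve : String) :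
    ((PySem.List.dedup ((PySem.Str.split₀ cve).foldl (fun acc w => acc ++ (pvIndex dbs).getD w []) [])).map
      (fun i => PySem.List.pyGetD dbs i "")).Perm (dbs.filter (pvShares cve)) := by
  have hJmem : ∀ i : Int,
      i ∈ ((PySem.List.enumerate dbs).filter (fun p => pvShares cve p.2)).map (fun p => p.1) ↔
        ∃ (k : Nat) (h : k < dbs.length), i = (k : Int) ∧ pvShares cve dbs[k] = true := by
    intro i
    simp only [List.mem_map, List.mem_filter, PySem.List.mem_enumerate_iff]
    constructor
    · rintro ⟨q, ⟨⟨k, hk, rfl⟩, hsh⟩, rfl⟩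
      exact ⟨k, hk, by omega, hsh⟩
    · rintro ⟨k, hk, rfl, hsh⟩
      exact ⟨((0 : Int) + k, dbs[k]), ⟨⟨k, hk, rfl⟩, hsh⟩, by omega⟩
  have hJnodup : (((PySem.List.enumerate dbs).filter (fun p => pvShares cve p.2)).map (fun p => p.1)).Nodup := by
    have h1 := (PySem.List.pairwise_lt_enumerate dbs 0).filter (fun p => pvShares cve p.2)
    have h2 : (((PySem.List.enumerate dbs).filter (fun p => pvShares cve p.2)).map (fun p => p.1)).Pairwise (· < ·) :=
      List.pairwise_map.mpr h1
    exact h2.imp ne_of_lt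
  have hperm : (PySem.List.dedup ((PySem.Str.split₀ cve).foldl (fun acc w => acc ++ (pvIndex dbs).getD w []) [])).Perm
      (((PySem.List.enumerate dbs).filter (fun p => pvShares cve p.2)).map (fun p => p.1)) := by
    rw [List.perm_ext_iff_of_nodup (PySem.List.nodup_dedup _) hJnodup]
    intro i; rw [pvMem_gather, hJmem]
  have hmap := hperm.map (fun i => PySem.List.pyGetD dbs i "")
  have hJmap : (((PySem.List.enumerate dbs).filter (fun p => pvShares cve p.2)).map (fun p => p.1)).map
      (fun i => PySem.List.pyGetD dbs i "") = dbs.filter (pvShares cve) := by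
    rw [List.map_map]
    have hcg : ((PySem.List.enumerate dbs).filter (fun p => pvShares cve p.2)).map
        ((fun i => PySem.List.pyGetD dbs i "") ∘ (fun p : Int × String => p.1)) =
        ((PySem.List.enumerate dbs).filter (fun p => pvShares cve p.2)).map (fun p => p.2) := by
      apply List.map_congr_left
      intro q hq
      rcases (PySem.List.mem_enumerate_iff dbs 0 q).mp (List.mem_filter.mp hq).1 with ⟨k, hk, rfl⟩
      simp only [Function.comp]
      have hz : (0 : Int) + k = (k : Int) := by omega
      rw [hz, PySem.List.pyGetD_natCast, List.getD_eq_getElem _ _ hk]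
    rw [hcg]
    rw [show (fun p : Int × String => pvShares cve p.2) =
          ((fun s => pvShares cve s) ∘ (fun p : Int × String => p.2)) from rfl]
    rw [← List.filter_map, PySem.List.map_snd_enumerate]
  rw [hJmap] at hmap
  exact hmap

-- A = B on each cve that is not the '' corner
theorem pvVal_eq (dbs : List String) (cve : String) (h : cve ≠ "" ∨ "" ∉ dbs) :
    pvValA dbs cve = pvValB dbs cve := by
  by_cases hm : cve ∈ dbs
  · have hne : cve ≠ "" := by
      rcases h with h | h
      · exact h
      · intro hh; exact h (hh ▸ hm)
    have h1 := pvLoopA_mem dbs cve [] hm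
    have h2 : (PySem.Set.ofList dbs).contains cve = true :=
      (PySem.Set.contains_iff _ _).mpr ((PySem.Set.mem_ofList _ _).mpr hm)
    rw [pvValA, pvValB, h1, if_pos hne, if_pos h2]
  · have h1 := pvLoopA_not_mem dbs cve [] hm
    have h2 : (PySem.Set.ofList dbs).contains cve = false := by
      rw [← Bool.not_eq_true, PySem.Set.contains_iff, PySem.Set.mem_ofList]; exact hm
    have hperm := pvGather_perm dbs cve
    have hlen := hperm.length_eq
    rw [pvValA, pvValB, h1, h2]
    simp only [List.nil_append, Bool.false_eq_true, if_false, ne_eq,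
      not_true_eq_false]
    by_cases hF : dbs.filter (pvShares cve) = []
    · have hidx : PySem.List.dedup ((PySem.Str.split₀ cve).foldl (fun acc w => acc ++ (pvIndex dbs).getD w []) []) = [] := by
        rw [hF] at hlen
        simp only [List.length_nil, List.length_map] at hlen
        exact List.eq_nil_of_length_eq_zero hlen
      simp only [hF, hidx, not_true_eq_false, if_false]
    · have hidx : PySem.List.dedup ((PySem.Str.split₀ cve).foldl (fun acc w => acc ++ (pvIndex dbs).getD w []) []) ≠ [] := by
        intro hh
        rw [hh] at hlen
        simp only [List.map_nil, List.length_nil] at hlen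
        exact hF (List.eq_nil_of_length_eq_zero hlen.symm)
      simp only [hF, hidx, not_false_eq_true, if_true]
      rw [PySem.List.sorted_eq_sorted_of_perm _ _ (fun x : String => x) (fun a b hab => hab) hperm]

theorem pvValA_empty (dbs : List String) : pvValA dbs "" = none := by
  simp [pvValA, pvLoopA_empty_cve]

-- Dict facts the fold argument needs (not in the PySem lemma list)
theorem pvDict_erase_insert {κ ν : Type} [BEq κ] [LawfulBEq κ] (d : PySem.Dict κ ν) (k : κ) (v : ν) :
    (d.insert k v).erase k = d.erase k := by
  show PySem.Dict.erase _ _ = PySem.Dict.erase _ _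
  unfold PySem.Dict.erase PySem.Dict.insert
  by_cases hc : d.contains k = true
  · rw [if_pos hc]
    congr 1
    generalize d.items = l
    induction l with
    | nil => rfl
    | cons p t ih =>
      by_cases hp : (p.1 == k) = true
      · simp [hp, ih]
      · simp [hp, ih]
  · rw [if_neg hc]
    congr 1
    rw [List.filter_append]
    simp

theorem pvDict_erase_of_not_mem {κ ν : Type} [BEq κ] [LawfulBEq κ] (d : PySem.Dict κ ν) (k : κ)
    (h : k ∉ d.keys) : d.erase k = d := by
  show PySem.Dict.erase _ _ = _
  unfold PySem.Dict.erase
  have hf : d.items.filter (fun p => !p.1 == k) = d.items := by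
    apply List.filter_eq_self.mpr
    intro p hp
    have hne : p.1 ≠ k := by
      intro hh
      exact h (hh ▸ List.mem_map_of_mem hp)
    simp [hne]
  rw [hf]

-- the step functions, as pvVal-driven updates
theorem pvStepA_spec (dbs : List String) (d : PySem.Dict String (List String)) (cve : String) :
    (let d' := d.insert cve ([] : List String)
     let ep := pvMatchLoopA cve [] dbs
     if ep.1 ≠ "" then d'.insert cve [ep.1]
     else if ep.2 ≠ [] then d'.insert cve (PySem.List.sorted ep.2 (fun x => x) false)
     else d'.erase cve) =
    (match pvValA dbs cve with
     | some v => d.insert cve v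
     | none => d.erase cve) := by
  simp only [pvValA]
  split_ifs with h1 h2
  · simp [PySem.Dict.insert_insert_self]
  · simp [PySem.Dict.insert_insert_self]
  · simp [pvDict_erase_insert]

theorem pvStepB_spec (dbs : List String) (d : PySem.Dict String (List String)) (cve : String) :
    (if (PySem.Set.ofList dbs).contains cve then d.insert cve [cve]
     else
       let idxs := PySem.List.dedup ((PySem.Str.split₀ cve).foldl (fun acc w => acc ++ (pvIndex dbs).getD w []) [])
       if idxs ≠ [] then
         d.insert cve (PySem.List.sorted (idxs.map (fun i => PySem.List.pyGetD dbs i "")) (fun x => x) false)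
       else d) =
    (match pvValB dbs cve with
     | some v => d.insert cve v
     | none => d) := by
  simp only [pvValB]
  split_ifs <;> rfl

theorem pv_fold_eq (dbs : List String) (cves : List String) (d : PySem.Dict String (List String))
    (hv : ∀ c ∈ cves, pvValA dbs c = pvValB dbs c)
    (hinv : ∀ k ∈ d.keys, pvValA dbs k ≠ none) :
    cves.foldl (fun d c => match pvValA dbs c with
      | some v => d.insert c v
      | none => d.erase c) d =
    cves.foldl (fun d c => match pvValB dbs c with
      | some v => d.insert c v
      | none => d) d := by
  induction cves generalizing d with
  | nil => rfl
  | cons c rest ih =>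
    simp only [List.foldl_cons]
    have hvc : pvValA dbs c = pvValB dbs c := hv c List.mem_cons_self
    cases hval : pvValB dbs c with
    | some v =>
      rw [hvc.trans hval]
      apply ih
      · intro c' hc'; exact hv c' (List.mem_cons_of_mem _ hc')
      · intro k hk
        rcases (PySem.Dict.mem_keys_insert _ _ _ _).mp hk with h | h
        · subst h; rw [hvc, hval]; simp
        · exact hinv k h
    | none =>
      rw [hvc.trans hval]
      have hcnot : c ∉ d.keys := by
        intro hc
        exact hinv c hc (hvc.trans hval)
      rw [pvDict_erase_of_not_mem d c hcnot]
      apply ih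
      · intro c' hc'; exact hv c' (List.mem_cons_of_mem _ hc')
      · exact hinv

-- keys of A's fold all carry a non-none pvValA (for the tightness theorem)
theorem pvFoldA_keys (dbs : List String) (cves : List String) (d : PySem.Dict String (List String))
    (hinv : ∀ k ∈ d.keys, pvValA dbs k ≠ none) :
    ∀ k ∈ (cves.foldl (fun d c => match pvValA dbs c with
      | some v => d.insert c v
      | none => d.erase c) d).keys, pvValA dbs k ≠ none := by
  induction cves generalizing d with
  | nil => exact hinv
  | cons c rest ih =>
    simp only [List.foldl_cons]
    cases hval : pvValA dbs c with
    | some v =>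
      apply ih
      intro k hk
      rcases (PySem.Dict.mem_keys_insert _ _ _ _).mp hk with h | h
      · subst h; rw [hval]; simp
      · exact hinv k h
    | none =>
      apply ih
      intro k hk
      have hkeq : (d.erase c).keys = (d.items.filter (fun p => !p.1 == c)).map (fun p => p.1) := rfl
      rw [hkeq] at hk
      rcases List.mem_map.mp hk with ⟨p, hp, rfl⟩
      exact hinv p.1 (List.mem_map_of_mem (List.mem_of_mem_filter hp))

theorem pvFoldB_keys_mono (dbs : List String) (cves : List String) (d : PySem.Dict String (List String))
    (k : String) (hk : k ∈ d.keys) :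
    k ∈ (cves.foldl (fun d c => match pvValB dbs c with
      | some v => d.insert c v
      | none => d) d).keys := by
  induction cves generalizing d with
  | nil => exact hk
  | cons c rest ih =>
    simp only [List.foldl_cons]
    cases hval : pvValB dbs c with
    | some v =>
      exact ih _ ((PySem.Dict.mem_keys_insert _ _ _ _).mpr (Or.inr hk))
    | none =>
      exact ih _ hk

theorem pvFoldB_mem_keys (dbs : List String) (cves : List String) (d : PySem.Dict String (List String))
    (c : String) (hc : c ∈ cves) (hv : pvValB dbs c ≠ none) :
    c ∈ (cves.foldl (fun d c => match pvValB dbs c with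
      | some v => d.insert c v
      | none => d) d).keys := by
  induction cves generalizing d with
  | nil => simp at hc
  | cons c0 rest ih =>
    simp only [List.foldl_cons]
    by_cases he : c = c0
    · subst he
      cases hval : pvValB dbs c with
      | some v =>
        exact pvFoldB_keys_mono dbs rest _ c ((PySem.Dict.mem_keys_insert _ _ _ _).mpr (Or.inl rfl))
      | none => exact absurd hval hv
    · have hr : c ∈ rest := by rcases List.mem_cons.mp hc with h | h; exact absurd h he; exact h
      cases hval : pvValB dbs c0 with
      | some v => exact ih _ hr
      | none => exact ih _ hr

-- ===== VERDICT (by name: the statement is the Claim_ definition above) =====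
theorem get_matched_software_names_spec : Claim_unchanged_get_matched_software_names := by
  intro cves dbs _
  unfold Spec_get_matched_software_names
  intro hnd
  unfold get_matched_software_names get_matched_software_names_alt
  congr 1
  refine Eq.trans (PySem.List.foldl_congr_mem _ _ _ _ (fun acc x _ => pvStepA_spec dbs acc x)) ?_
  refine Eq.trans (pv_fold_eq dbs cves PySem.Dict.empty ?_ ?_)
    (PySem.List.foldl_congr_mem _ _ _ _ (fun acc x _ => pvStepB_spec dbs acc x)).symm
  · intro c hcm
    apply pvVal_eq
    by_cases hdb : "" ∈ dbs
    · left
      intro hc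
      exact hnd ⟨hc ▸ hcm, hdb⟩
    · right; exact hdb
  · intro k hk; simp [PySem.Dict.keys, PySem.Dict.empty] at hk

theorem get_matched_software_names_changed : Claim_changed_get_matched_software_names := by
  unfold Claim_changed_get_matched_software_names; decide

theorem get_matched_software_names_tight : Claim_exact_get_matched_software_names := by
  intro cves dbs _ hD heq
  rcases hD with ⟨hc, hd⟩
  unfold get_matched_software_names get_matched_software_names_alt at heq
  have heq2 : (cves.foldl (fun d c => match pvValA dbs c with
      | some v => d.insert c v
      | none => d.erase c) PySem.Dict.empty).items =
    (cves.foldl (fun d c => match pvValB dbs c with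
      | some v => d.insert c v
      | none => d) PySem.Dict.empty).items := by
    have e1 := PySem.List.foldl_congr_mem cves _ _ PySem.Dict.empty
      (fun acc x _ => pvStepA_spec dbs acc x)
    have e2 := PySem.List.foldl_congr_mem cves _ _ PySem.Dict.empty
      (fun acc x _ => pvStepB_spec dbs acc x)
    rw [← e1, ← e2]
    exact heq
  have hA := pvFoldA_keys dbs cves PySem.Dict.empty
    (by intro k hk; simp [PySem.Dict.keys, PySem.Dict.empty] at hk)
  have hBval : pvValB dbs "" ≠ none := by
    have h2 : (PySem.Set.ofList dbs).contains "" = true :=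
      (PySem.Set.contains_iff _ _).mpr ((PySem.Set.mem_ofList _ _).mpr hd)
    rw [pvValB, if_pos h2]
    simp
  have hB := pvFoldB_mem_keys dbs cves PySem.Dict.empty "" hc hBval
  have hkeys : (cves.foldl (fun d c => match pvValA dbs c with
      | some v => d.insert c v
      | none => d.erase c) PySem.Dict.empty).keys =
    (cves.foldl (fun d c => match pvValB dbs c with
      | some v => d.insert c v
      | none => d) PySem.Dict.empty).keys := congrArg (List.map (fun p : String × List String => p.1)) heq2
  exact hA "" (by rw [hkeys]; exact hB) (pvValA_empty dbs)
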